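-- pv_equiv track=rewrite | github.com/oscarblanco86/fccDailyChallenge | dailyChallenge/python/2026/01/21.py | parse_inline_code
-- ===== SOURCE A (Python) =====
-- def parse_inline_code(markdown):
--     close_code = False
--     markdown_corrected = []
--     for ch in markdown:
--         if ch == '`':
--             if close_code:
--                 close_code = False
--                 markdown_corrected.append('</code>')
--             else:
--                 close_code = True
--                 markdown_corrected.append('<code>')
--         else:
--             markdown_corrected.append(ch)
--     return "".join(markdown_corrected)
-- ===== SOURCE B (Python) =====
-- def parse_inline_code(markdown):
--     parts = markdown.split('`')
--     out = [parts[0]]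
--     for i, part in enumerate(parts[1:]):
--         out.append('<code>' if i % 2 == 0 else '</code>')
--         out.append(part)
--     return ''.join(out)
-- ===== Notes on version B (the rewrite author's own statement) =====
-- stated objective: faster
-- what changed: B splits the string on backticks once and interleaves the segments with alternating tags chosen by separator-index parity, replacing A's per-character Python loop with a running boolean flag.
import Mathlib
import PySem

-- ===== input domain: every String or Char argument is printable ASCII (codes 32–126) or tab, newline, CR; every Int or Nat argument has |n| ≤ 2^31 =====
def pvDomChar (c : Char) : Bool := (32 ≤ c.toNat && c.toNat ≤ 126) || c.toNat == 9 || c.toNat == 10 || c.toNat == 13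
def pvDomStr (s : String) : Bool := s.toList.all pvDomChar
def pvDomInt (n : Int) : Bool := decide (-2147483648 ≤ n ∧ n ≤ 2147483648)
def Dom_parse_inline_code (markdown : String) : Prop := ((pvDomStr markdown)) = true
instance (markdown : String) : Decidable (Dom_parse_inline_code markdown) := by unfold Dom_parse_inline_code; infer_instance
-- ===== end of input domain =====

-- B replaces A's per-character loop with a boolean flag by one split on '`' and an
-- interleave of the segments with tags chosen by separator-index parity (measured faster by a constant factor).

-- ===== PORT A =====
-- A: char-by-char loop with a running close_code flag, accumulating string pieces, then "".join.
def aStep (st : Bool × List (List Char)) (ch : Char) : Bool × List (List Char) :=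
  if ch = '`' then
    if st.1 then (false, st.2 ++ ["</code>".toList])
    else (true, st.2 ++ ["<code>".toList])
  else (st.1, st.2 ++ [[ch]])

def parse_inline_code (markdown : String) : String :=
  let st := markdown.toList.foldl aStep (false, [])
  String.ofList st.2.flatten

-- ===== PORT B =====
-- B: split on '`' (Lean's List.splitOn is str.split for a one-char separator), then
-- interleave parts[1:] with tags by index parity, joining at the end.
def bStep (st : Nat × List (List Char)) (part : List Char) : Nat × List (List Char) :=
  (st.1 + 1, st.2 ++ [if st.1 % 2 == 0 then "<code>".toList else "</code>".toList, part])
def parse_inline_code_alt (markdown : String) : String :=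
  match markdown.toList.splitOn '`' with
  | [] => ""    -- unreachable: split always returns at least one part
  | p :: rest =>
      let out := (rest.foldl bStep (0, [p])).2
      String.ofList out.flatten

-- ===== PRECONDITION & SPEC =====
def Spec_parse_inline_code (markdown : String) (out : String) : Prop := out = parse_inline_code_alt markdown
instance (markdown : String) (out : String) : Decidable (Spec_parse_inline_code markdown out) := by unfold Spec_parse_inline_code; infer_instance

-- ===== CLAIM (what is proved, stated in full; the proofs are below) =====
def Claim_equal_parse_inline_code : Prop := ∀ (markdown : String), Dom_parse_inline_code markdown → Spec_parse_inline_code markdown (parse_inline_code markdown)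

-- ===== LEMMAS AND PROOFS =====

-- the list of string pieces A's loop appends, starting from flag `flag`
def aPieces (flag : Bool) : List Char → List (List Char)
  | [] => []
  | c :: cs =>
      if c = '`' then (if flag then "</code>".toList else "<code>".toList) :: aPieces (!flag) cs
      else [c] :: aPieces flag cs

-- the segments interleaved with alternating tags, `flag = true` meaning "</code>" next
def tagStream (flag : Bool) : List (List Char) → List Char
  | [] => []
  | p :: ps => (if flag then "</code>".toList else "<code>".toList) ++ p ++ tagStream (!flag) ps

-- the pieces B's loop appends starting at index i
def bPieces (i : Nat) : List (List Char) → List (List Char)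
  | [] => []
  | p :: ps => (if i % 2 == 0 then "<code>".toList else "</code>".toList) :: p :: bPieces (i + 1) ps

theorem aFold_eq (cs : List Char) : ∀ (flag : Bool) (acc : List (List Char)),
    (cs.foldl aStep (flag, acc)).2 = acc ++ aPieces flag cs := by
  induction cs with
  | nil => intro flag acc; simp [aPieces]
  | cons c cs ih =>
      intro flag acc
      rw [List.foldl_cons]
      by_cases hc : c = '`'
      · cases flag
        · have hstep : aStep (false, acc) c = (true, acc ++ ["<code>".toList]) := by
            simp [aStep, hc]
          rw [hstep, ih]; simp [aPieces, hc]
        · have hstep : aStep (true, acc) c = (false, acc ++ ["</code>".toList]) := by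
            simp [aStep, hc]
          rw [hstep, ih]; simp [aPieces, hc]
      · have hstep : aStep (flag, acc) c = (flag, acc ++ [[c]]) := by
          simp [aStep, hc]
        rw [hstep, ih]; simp [aPieces, hc]

theorem bFold_eq (ps : List (List Char)) : ∀ (i : Nat) (acc : List (List Char)),
    (ps.foldl bStep (i, acc)).2 = acc ++ bPieces i ps := by
  induction ps with
  | nil => intro i acc; simp [bPieces]
  | cons p ps ih =>
      intro i acc
      rw [List.foldl_cons]
      have hstep : bStep (i, acc) p =
          (i + 1, acc ++ [if i % 2 == 0 then "<code>".toList else "</code>".toList, p]) := rfl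
      rw [hstep, ih]; simp [bPieces]

theorem bPieces_flatten (ps : List (List Char)) : ∀ (i : Nat),
    (bPieces i ps).flatten = tagStream (i % 2 == 1) ps := by
  induction ps with
  | nil => intro i; simp [bPieces, tagStream]
  | cons p ps ih =>
      intro i
      have h2 : ((i + 1) % 2 == 1) = !(i % 2 == 1) := by
        rcases Nat.mod_two_eq_zero_or_one i with h | h <;> simp [Nat.add_mod, *]
      have h0 : (i % 2 == 0) = !(i % 2 == 1) := by
        rcases Nat.mod_two_eq_zero_or_one i with h | h <;> simp [h]
      rw [bPieces, tagStream, List.flatten_cons, List.flatten_cons, ih, h2, h0]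
      cases hb : (i % 2 == 1) <;> simp

theorem aPieces_flatten (cs : List Char) : ∀ (flag : Bool),
    (aPieces flag cs).flatten =
      (cs.splitOn '`').headD [] ++ tagStream flag (cs.splitOn '`').tail := by
  induction cs with
  | nil => intro flag; simp [aPieces, tagStream]
  | cons c cs ih =>
      intro flag
      obtain ⟨p, rest, hrest⟩ : ∃ p rest, cs.splitOn '`' = p :: rest := by
        rcases h : cs.splitOn '`' with _ | ⟨p, rest⟩
        · exact absurd h (List.splitOnP_ne_nil _ _)
        · exact ⟨p, rest, rfl⟩
      by_cases hc : c = '`'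
      · have hs : (('`' :: cs).splitOn '`') = [] :: cs.splitOn '`' := by
          simp [List.splitOn, List.splitOnP_cons]
        subst hc
        simp [aPieces, hs, hrest, tagStream, ih]
      · have hs : ((c :: cs).splitOn '`') =
            ((cs.splitOn '`').modifyHead (List.cons c)) := by
          simp [List.splitOn, List.splitOnP_cons, hc]
        simp [aPieces, hc, hs, hrest, ih]

-- ===== VERDICT (by name: the statement is the Claim_ definition above) =====
theorem parse_inline_code_spec : Claim_equal_parse_inline_code := by
  unfold Claim_equal_parse_inline_code
  intro markdown _
  unfold Spec_parse_inline_code parse_inline_code parse_inline_code_alt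
  obtain ⟨p, rest, hrest⟩ : ∃ p rest, markdown.toList.splitOn '`' = p :: rest := by
    rcases h : markdown.toList.splitOn '`' with _ | ⟨p, rest⟩
    · exact absurd h (List.splitOnP_ne_nil _ _)
    · exact ⟨p, rest, rfl⟩
  simp only [hrest, aFold_eq, bFold_eq, List.nil_append]
  rw [aPieces_flatten markdown.toList false]
  simp [hrest, bPieces_flatten, List.flatten_cons]
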